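-- pv_equiv track=rewrite | github.com/sefayurtseven/Basic-Text-Processing-Language-Models | TextProcess.py | replace_unk_less_freq_words
-- ===== SOURCE A (Python) =====
-- def get_word_freq_dict(sent_lst):
--     word_freq_dict = {}
--     for s in sent_lst:
--         for w in s:
--             if word_freq_dict.keys().__contains__(w):
--                 word_freq_dict[w] = word_freq_dict[w] + 1
--             else:
--                 word_freq_dict[w] = 1
--
--     word_freq_dict = {k: v for k, v in sorted(word_freq_dict.items(), key=lambda item: item[1])}
--     return word_freq_dict
--
-- def replace_unk_less_freq_words(sent_lst):
--     freq_dict = get_word_freq_dict(sent_lst)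
--     for sent in sent_lst:
--         for less_freq_word in list(freq_dict)[:3]:
--             if sent.__contains__(less_freq_word):
--                 index = sent.index(less_freq_word)
--                 sent[index] = "unk"
--     return sent_lst
-- ===== SOURCE B (Python) =====
-- def replace_unk_less_freq_words(sent_lst):
--     # one frequency pass, then a single left-to-right pass per sentence driven
--     # by set membership (instead of a membership-test + index-scan per low-freq word)
--     freq = {}
--     for s in sent_lst:
--         for w in s:
--             freq[w] = freq.get(w, 0) + 1
--     low_freq = set(kv[0] for kv in sorted(freq.items(), key=lambda kv: kv[1])[:3])
--     for sent in sent_lst: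
--         replaced = set()
--         for i, w in enumerate(sent):
--             if w in low_freq and w not in replaced:
--                 sent[i] = "unk"
--                 replaced.add(w)
--     return sent_lst
-- ===== Notes on version B (the rewrite author's own statement) =====
-- stated objective: alternative
-- what changed: Per sentence, the 'for each of the 3 least-frequent words: membership test + list.index scan + assignment' loop is replaced by one left-to-right pass with a per-sentence replaced-set, and the frequency dict is built with dict.get instead of a keys() membership branch.
import Mathlib
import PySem

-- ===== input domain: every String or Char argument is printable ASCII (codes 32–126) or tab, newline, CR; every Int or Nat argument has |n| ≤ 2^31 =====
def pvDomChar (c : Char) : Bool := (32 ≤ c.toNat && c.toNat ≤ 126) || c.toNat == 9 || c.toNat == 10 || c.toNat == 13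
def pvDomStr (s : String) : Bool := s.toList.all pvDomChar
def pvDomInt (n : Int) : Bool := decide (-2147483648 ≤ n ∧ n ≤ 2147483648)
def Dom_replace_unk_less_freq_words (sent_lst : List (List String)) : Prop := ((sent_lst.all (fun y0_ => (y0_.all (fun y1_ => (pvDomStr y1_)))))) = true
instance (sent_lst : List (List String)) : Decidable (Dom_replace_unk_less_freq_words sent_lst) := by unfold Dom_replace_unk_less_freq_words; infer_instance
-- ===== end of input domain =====

-- B replaces A's per-sentence "for each of the 3 rarest words: membership test + index scan"
-- with a single left-to-right pass per sentence keeping a replaced-set (objective: alternative,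
-- same cost class). Python A mutates the inner lists in place and returns the outer list; the
-- equivalence proved here is about the RETURN value (B performs the same in-place mutation).

-- ===== PORT A =====
-- helper for A's inner loop body: "if sent.__contains__(w): sent[sent.index(w)] = 'unk'"
-- (word_freq_dict[w] is ported as getD w 0, exact because the access is guarded by the
-- keys-containment test)
def replaceFirstUnk (sent : List String) (w : String) : List String :=
  if sent.contains w then
    match PySem.List.index? sent w with
    | some i => sent.set i "unk"
    | none => sent
  else sent

def get_word_freq_dict (sent_lst : List (List String)) : PySem.Dict String Int :=
  let word_freq_dict : PySem.Dict String Int :=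
    sent_lst.foldl (fun d s =>
      s.foldl (fun d w =>
        if (PySem.Dict.keys d).contains w then d.insert w (d.getD w 0 + 1)
        else d.insert w 1) d) PySem.Dict.empty
  (PySem.List.sorted word_freq_dict.items (fun item => item.2) false).foldl
    (fun d kv => d.insert kv.1 kv.2) PySem.Dict.empty

def replace_unk_less_freq_words (sent_lst : List (List String)) : List (List String) :=
  let freq_dict := get_word_freq_dict sent_lst
  sent_lst.map (fun sent =>
    (PySem.List.slice (PySem.Dict.keys freq_dict) none (some 3)).foldl replaceFirstUnk sent)

-- ===== PORT B =====
-- B-side helper: the single pass "for i, w in enumerate(sent): if w in low_freq and w not in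
-- replaced: sent[i] = 'unk'; replaced.add(w)", written as structural recursion on the sentence
def bPass (low : PySem.Set String) : List String → PySem.Set String → List String
  | [], _ => []
  | w :: rest, replaced =>
    if PySem.Set.contains low w && !(PySem.Set.contains replaced w) then
      "unk" :: bPass low rest (PySem.Set.add replaced w)
    else w :: bPass low rest replaced

def replace_unk_less_freq_words_alt (sent_lst : List (List String)) : List (List String) :=
  let freq : PySem.Dict String Int :=
    sent_lst.foldl (fun d s => s.foldl (fun d w => d.insert w (d.getD w 0 + 1)) d)
      PySem.Dict.empty
  let low_freq : PySem.Set String :=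
    PySem.Set.ofList
      ((PySem.List.slice (PySem.List.sorted freq.items (fun kv => kv.2) false) none (some 3)).map
        (fun kv => kv.1))
  sent_lst.map (fun sent => bPass low_freq sent PySem.Set.empty)

-- ===== PRECONDITION & SPEC =====
def Spec_replace_unk_less_freq_words (sent_lst : List (List String)) (out : List (List String)) : Prop := out = replace_unk_less_freq_words_alt sent_lst
instance (sent_lst : List (List String)) (out : List (List String)) : Decidable (Spec_replace_unk_less_freq_words sent_lst out) := by unfold Spec_replace_unk_less_freq_words; infer_instance

-- ===== CLAIM (what is proved, stated in full; the proofs are below) =====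
def Claim_equal_replace_unk_less_freq_words : Prop := ∀ (sent_lst : List (List String)), Dom_replace_unk_less_freq_words sent_lst → Spec_replace_unk_less_freq_words sent_lst (replace_unk_less_freq_words sent_lst)

-- ===== LEMMAS AND PROOFS =====

-- reference form: replace, in one pass, the first occurrence of each still-pending word by "unk"
def specR : List String → List String → List String
  | [], _ => []
  | t :: rest, S =>
    if S.contains t then "unk" :: specR rest (S.erase t) else t :: specR rest S

lemma specR_nil_pending (sent : List String) : specR sent [] = sent := by
  induction sent with
  | nil => rfl
  | cons t rest ih => simp [specR, ih]

lemma specR_not_mem (sent : List String) (w : String) (S : List String) (h : w ∉ sent) :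
    specR sent (w :: S) = specR sent S := by
  induction sent generalizing S with
  | nil => rfl
  | cons t rest ih =>
    have htw : t ≠ w := by intro e; exact h (e ▸ List.mem_cons_self)
    have hrest : w ∉ rest := fun hm => h (List.mem_cons_of_mem _ hm)
    simp [specR, htw, htw.symm, List.erase_cons_tail, ih _ hrest]

lemma specR_erase_unk (sent : List String) (S : List String) (h : S.Nodup) :
    specR sent (S.erase "unk") = specR sent S := by
  induction sent generalizing S with
  | nil => rfl
  | cons t rest ih =>
    by_cases ht : t = "unk"
    · subst ht
      have hnm : "unk" ∉ S.erase "unk" := fun hm => ((List.Nodup.mem_erase_iff h).mp hm).1 rfl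
      by_cases hcs : "unk" ∈ S
      · simp [specR, hnm, hcs]
      · simp [specR, hcs, List.erase_of_not_mem hcs]
    · have hmem : t ∈ S.erase "unk" ↔ t ∈ S := by
        rw [List.Nodup.mem_erase_iff h]; exact ⟨fun a => a.2, fun a => ⟨ht, a⟩⟩
      by_cases hcs : t ∈ S
      · have hcomm : (S.erase "unk").erase t = (S.erase t).erase "unk" := by
          rw [List.erase_comm]
        simp [specR, hmem.mpr hcs, hcs, hcomm, ih _ (List.Nodup.erase _ h)]
      · have hne : t ∉ S.erase "unk" := fun hh => hcs (hmem.mp hh)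
        simp [specR, hcs, hne, ih _ h]

lemma specR_repFirst (sent : List String) (S : List String) (w : String)
    (hw : w ∉ S) (h : S.Nodup) :
    specR (replaceFirstUnk sent w) S = specR sent (w :: S) := by
  induction sent generalizing S with
  | nil => simp [replaceFirstUnk, specR]
  | cons t rest ih =>
    by_cases hc : w ∈ t :: rest
    · by_cases htw : t = w
      · subst htw
        have h1 : replaceFirstUnk (t :: rest) t = "unk" :: rest := by
          simp only [replaceFirstUnk]
          rw [PySem.List.index?_cons_self]
          simp
        rw [h1]
        by_cases hu : "unk" ∈ S
        · simp [specR, hu, specR_erase_unk _ _ h, hw]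
        · simp [specR, hu, hw]
      · have hr : w ∈ rest := by
          rcases List.mem_cons.mp hc with e | hm
          · exact absurd e.symm htw
          · exact hm
        obtain ⟨i, hi⟩ : ∃ i, PySem.List.index? rest w = some i := by
          have := (PySem.List.index?_isSome_iff (xs := rest) (v := w)).mpr hr
          exact Option.isSome_iff_exists.mp this
        have h2 : replaceFirstUnk rest w = rest.set i "unk" := by
          simp only [replaceFirstUnk]
          rw [hi]
          simp [hr]
        have h1 : replaceFirstUnk (t :: rest) w = t :: rest.set i "unk" := by
          simp only [replaceFirstUnk]
          rw [PySem.List.index?_cons_of_ne rest htw, hi]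
          simp [hc]
        rw [h1]
        by_cases hts : t ∈ S
        · have hwe : w ∉ S.erase t := fun hm => hw (List.mem_of_mem_erase hm)
          have := ih (S.erase t) hwe (List.Nodup.erase _ h)
          rw [h2] at this
          have hcet : (w :: S).erase t = w :: S.erase t := by
            rw [List.erase_cons_tail (by simp [Ne.symm htw])]
          simp [specR, hts, htw, this, hcet]
        · have := ih S hw h
          rw [h2] at this
          simp [specR, hts, htw, this]
    · have h1 : replaceFirstUnk (t :: rest) w = t :: rest := by
        simp [replaceFirstUnk, hc]
      rw [h1]
      exact (specR_not_mem _ _ _ hc).symm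

lemma foldl_repFirst (low : List String) (sent : List String) (h : low.Nodup) :
    low.foldl replaceFirstUnk sent = specR sent low := by
  induction low generalizing sent with
  | nil => simp [specR_nil_pending]
  | cons w ws ih =>
    have : w ∉ ws := (List.nodup_cons.mp h).1
    simp only [List.foldl_cons]
    rw [ih _ (List.nodup_cons.mp h).2, specR_repFirst _ _ _ this (List.nodup_cons.mp h).2]

lemma bPass_eq (low : List String) (hl : low.Nodup) :
    ∀ (sent : List String) (rep : List String),
      bPass low sent rep = specR sent (low.filter (fun x => !(rep.contains x))) := by
  intro sent
  induction sent with
  | nil => intro rep; rfl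
  | cons t rest ih =>
    intro rep
    by_cases hlt : t ∈ low
    · by_cases hrt : t ∈ rep
      · simp [bPass, specR, hrt, ih rep]
      · have hadd : PySem.Set.add rep t = rep ++ [t] := PySem.Set.add_of_not_mem hrt
        have hfe : low.filter (fun x => !((rep ++ [t]).contains x))
            = (low.filter (fun x => !(rep.contains x))).erase t := by
          rw [List.Nodup.erase_eq_filter (List.Nodup.filter _ hl), List.filter_filter]
          apply List.filter_congr
          intro x _
          by_cases hx : x = t
          · subst hx; simp
          · simp [hx]
        simp only [bPass, hadd, ih (rep ++ [t]), hfe]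
        simp [specR, hlt, hrt]
    · simp [bPass, specR, hlt, ih rep]

theorem per_sentence (low : List String) (hl : low.Nodup) (sent : List String) :
    low.foldl replaceFirstUnk sent = bPass low sent PySem.Set.empty := by
  rw [foldl_repFirst _ _ hl, bPass_eq _ hl]
  simp

lemma step_eq (d : PySem.Dict String Int) (w : String) :
    (if (PySem.Dict.keys d).contains w then d.insert w (d.getD w 0 + 1) else d.insert w 1)
      = d.insert w (d.getD w 0 + 1) := by
  by_cases h : (PySem.Dict.keys d).contains w = true
  · rw [if_pos h]
  · rw [if_neg h]
    have hc : d.contains w = false := by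
      rw [← Bool.not_eq_true]
      rw [PySem.Dict.contains_iff_mem_keys]
      simpa using h
    have hg : d.getD w 0 = 0 := PySem.Dict.getD_of_not_contains d 0 hc
    rw [hg]
    norm_num

lemma inner_eq (s : List String) : ∀ (d : PySem.Dict String Int),
    s.foldl (fun d w =>
      if (PySem.Dict.keys d).contains w then d.insert w (d.getD w 0 + 1)
      else d.insert w 1) d
    = s.foldl (fun d w => d.insert w (d.getD w 0 + 1)) d := by
  induction s with
  | nil => intro d; rfl
  | cons w r ih =>
    intro d
    simp only [List.foldl_cons]
    rw [step_eq]
    exact ih _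

lemma freq_eq (sent_lst : List (List String)) : ∀ (d : PySem.Dict String Int),
    sent_lst.foldl (fun d s => s.foldl (fun d w =>
        if (PySem.Dict.keys d).contains w then d.insert w (d.getD w 0 + 1)
        else d.insert w 1) d) d
  = sent_lst.foldl (fun d s => s.foldl (fun d w => d.insert w (d.getD w 0 + 1)) d) d := by
  induction sent_lst with
  | nil => intro d; rfl
  | cons s rest ih =>
    intro d
    simp only [List.foldl_cons]
    rw [inner_eq]
    exact ih _

lemma nodup_keys_freq (sent_lst : List (List String)) :
    (sent_lst.foldl (fun d s => s.foldl (fun d w => d.insert w (d.getD w 0 + 1)) d)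
      (PySem.Dict.empty : PySem.Dict String Int)).keys.Nodup := by
  suffices h : ∀ (d : PySem.Dict String Int), d.keys.Nodup →
      (sent_lst.foldl (fun d s => s.foldl (fun d w => d.insert w (d.getD w 0 + 1)) d) d).keys.Nodup by
    exact h _ (by simp)
  induction sent_lst with
  | nil => intro d hd; exact hd
  | cons s rest ih =>
    intro d hd
    exact ih _ (PySem.Dict.nodup_keys_foldl_insert s (fun d w => d.getD w 0 + 1) d hd)

lemma keys_rebuild (l : List (String × Int)) (h : (l.map Prod.fst).Nodup) :
    (l.foldl (fun d kv => d.insert kv.1 kv.2) (PySem.Dict.empty : PySem.Dict String Int)).keys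
      = l.map Prod.fst := by
  rw [PySem.Dict.keys_foldl_insert_key (key := Prod.fst) (f := fun _ kv => kv.2)]
  rw [PySem.Dict.keys_empty, PySem.Set.update_nil_left]
  exact PySem.Set.ofList_eq_self_of_nodup _ h

lemma slice_three {α : Type} (xs : List α) :
    PySem.List.slice xs none (some 3) = xs.take 3 := by
  have := PySem.List.slice_to_natCast (xs := xs) (b := 3)
  simpa using this

-- ===== VERDICT (by name: the statement is the Claim_ definition above) =====
theorem replace_unk_less_freq_words_spec : Claim_equal_replace_unk_less_freq_words := by
  intro sl _
  unfold Spec_replace_unk_less_freq_words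
  simp only [replace_unk_less_freq_words, replace_unk_less_freq_words_alt, get_word_freq_dict]
  apply List.map_congr_left
  intro sent _
  rw [freq_eq sl PySem.Dict.empty]
  set F := sl.foldl (fun d s => s.foldl (fun d w => d.insert w (d.getD w 0 + 1)) d)
      (PySem.Dict.empty : PySem.Dict String Int) with hF
  set itemsSorted := PySem.List.sorted F.items (fun kv => kv.2) false with hIS
  have hnodup : (itemsSorted.map Prod.fst).Nodup := by
    have hperm : (itemsSorted.map Prod.fst).Perm (F.items.map Prod.fst) :=
      List.Perm.map _ (PySem.List.sorted_perm _ _ _)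
    have : (F.items.map Prod.fst).Nodup := nodup_keys_freq sl
    exact hperm.symm.nodup this
  have hmt : (itemsSorted.take 3).map (fun kv => kv.1) = (itemsSorted.map Prod.fst).take 3 := by
    rw [List.map_take]
  have hlnd : ((itemsSorted.map Prod.fst).take 3).Nodup :=
    List.Nodup.sublist (List.take_sublist _ _) hnodup
  rw [keys_rebuild _ hnodup, slice_three, slice_three, hmt,
    PySem.Set.ofList_eq_self_of_nodup _ hlnd]
  exact per_sentence _ hlnd sent
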